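-- pv_equiv track=rewrite | github.com/liu-bluesky/AI-Native | web-admin/api/services/employee_template_import_service.py | _split_tree_subpath
-- ===== SOURCE A (Python) =====
-- def _split_tree_subpath(parts: list[str]) -> tuple[str, str]:
--     if not parts:
--         return "", ""
--     if len(parts) == 1:
--         return parts[0], ""
--     best_branch = ""
--     best_subdir = ""
--     for idx in range(1, len(parts) + 1):
--         branch_candidate = "/".join(parts[:idx]).strip("/")
--         subdir_candidate = "/".join(parts[idx:]).strip("/")
--         if not branch_candidate:
--             continue
--         best_branch = branch_candidate
--         best_subdir = subdir_candidate
--         if subdir_candidate: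
--             break
--     return best_branch, best_subdir
-- ===== SOURCE B (Python) =====
-- def _split_tree_subpath(parts: list[str]) -> tuple[str, str]:
--     # Alternative strategy: locate the first part containing a non-'/' character; the split
--     # point is right after it if anything meaningful follows, else take everything.
--     if not parts:
--         return "", ""
--     if len(parts) == 1:
--         return parts[0], ""
--     i0 = next((i for i, p in enumerate(parts) if p.strip("/")), None)
--     if i0 is None:
--         return "", ""
--     k = i0 + 1
--     if any(p.strip("/") for p in parts[k:]):
--         return "/".join(parts[:k]).strip("/"), "/".join(parts[k:]).strip("/")
--     return "/".join(parts).strip("/"), ""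
-- ===== Notes on version B (the rewrite author's own statement) =====
-- stated objective: alternative
-- what changed: A re-joins and re-strips both halves of the list at every candidate index until one works; B makes one pass to find the first part containing a non-'/' character, decides the split point directly from that marker, and joins/strips once.
import Mathlib
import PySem

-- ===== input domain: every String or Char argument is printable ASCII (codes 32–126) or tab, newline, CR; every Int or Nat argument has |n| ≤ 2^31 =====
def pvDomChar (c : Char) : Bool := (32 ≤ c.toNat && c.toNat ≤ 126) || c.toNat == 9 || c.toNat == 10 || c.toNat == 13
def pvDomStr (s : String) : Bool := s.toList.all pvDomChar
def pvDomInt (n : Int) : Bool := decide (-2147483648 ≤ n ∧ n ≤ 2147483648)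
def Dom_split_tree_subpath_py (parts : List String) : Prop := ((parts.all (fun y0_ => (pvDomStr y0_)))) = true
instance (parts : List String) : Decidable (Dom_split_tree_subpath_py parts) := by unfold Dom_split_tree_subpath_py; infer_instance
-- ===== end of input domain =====

-- B changes the algorithm: instead of A's scan that re-joins and re-strips both halves at
-- every candidate index until one works, B finds the first part containing a non-'/'
-- character in one pass and joins/strips once at the split point it determines
-- (objective: alternative).


-- ===== PORT A =====
-- branch/subdir candidate at index idx, exactly A's "/".join(parts[:idx]).strip("/") and
-- "/".join(parts[idx:]).strip("/") (idx ≥ 0 here, produced by range(1, len+1), so the Python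
-- slices parts[:idx] / parts[idx:] are exactly List.take / List.drop).
def pvBranchCand (parts : List String) (idx : Nat) : String :=
  PySem.Str.stripChars (PySem.Str.join "/" (parts.take idx)) "/"

def pvSubdirCand (parts : List String) (idx : Nat) : String :=
  PySem.Str.stripChars (PySem.Str.join "/" (parts.drop idx)) "/"

-- A's for-loop over 'for idx in range(1, len(parts)+1)' with state (best_branch, best_subdir),
-- 'continue' and 'break' kept as in the source.
def pvALoop (parts : List String) : List Nat → String × String → String × String
  | [], best => best
  | idx :: rest, best =>
      if pvBranchCand parts idx = "" then pvALoop parts rest best      -- if not branch_candidate: continue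
      else if pvSubdirCand parts idx ≠ "" then (pvBranchCand parts idx, pvSubdirCand parts idx)  -- update best, break
      else pvALoop parts rest (pvBranchCand parts idx, pvSubdirCand parts idx)  -- update best, continue

def split_tree_subpath_py (parts : List String) : String × String :=
  if parts = [] then ("", "")                                          -- if not parts
  else if parts.length = 1 then (PySem.List.pyGetD parts 0 "", "")     -- return parts[0], ""
  else pvALoop parts (List.range' 1 parts.length) ("", "")             -- range(1, len(parts)+1) = [1..len]

-- ===== PORT B =====
-- B's per-part test 'p.strip("/")' (truthy ↔ nonempty after stripping '/')
def pvHasContent (p : String) : Bool := PySem.Str.stripChars p "/" != ""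

def split_tree_subpath_py_alt (parts : List String) : String × String :=
  match parts with
  | [] => ("", "")
  | [p] => (p, "")
  | _ =>
    match parts.findIdx? pvHasContent with                             -- next((i for i,p in enumerate(parts) if p.strip("/")), None)
    | none => ("", "")
    | some i0 =>
      let k := i0 + 1
      if (parts.drop k).any pvHasContent then                          -- any(p.strip("/") for p in parts[k:])
        (PySem.Str.stripChars (PySem.Str.join "/" (parts.take k)) "/",
         PySem.Str.stripChars (PySem.Str.join "/" (parts.drop k)) "/")
      else
        (PySem.Str.stripChars (PySem.Str.join "/" parts) "/", "")

-- ===== PRECONDITION & SPEC =====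
def Spec_split_tree_subpath_py (parts : List String) (out : String × String) : Prop := out = split_tree_subpath_py_alt parts
instance (parts : List String) (out : String × String) : Decidable (Spec_split_tree_subpath_py parts out) := by unfold Spec_split_tree_subpath_py; infer_instance

-- ===== CLAIM (what is proved, stated in full; the proofs are below) =====
def Claim_equal_split_tree_subpath_py : Prop := ∀ (parts : List String), Dom_split_tree_subpath_py parts → Spec_split_tree_subpath_py parts (split_tree_subpath_py parts)

-- ===== LEMMAS AND PROOFS =====

-- s.strip("/") is empty iff every character of s is '/'
lemma stripChars_slash_empty_iff (s : String) :
    PySem.Str.stripChars s "/" = "" ↔ ∀ c ∈ s.toList, c = '/' := by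
  constructor
  · intro h c hc
    have h' : (PySem.Str.stripChars s "/").toList = [] := by rw [h]; rfl
    rw [PySem.Str.toList_stripChars] at h'
    simp only [PySem.Chars.stripChars, List.reverse_eq_nil_iff, List.dropWhile_eq_nil_iff,
      List.mem_reverse] at h'
    have hsplit := List.takeWhile_append_dropWhile
      (p := fun c => (("/" : String).toList).contains c) (l := s.toList)
    rw [← hsplit] at hc
    rcases List.mem_append.mp hc with h1 | h2
    · have := List.mem_takeWhile_imp h1
      simpa using this
    · have := h' _ h2
      simpa using this
  · intro h
    have h' : PySem.Chars.stripChars s.toList "/".toList = [] := by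
      simp only [PySem.Chars.stripChars, List.reverse_eq_nil_iff, List.dropWhile_eq_nil_iff,
        List.mem_reverse]
      intro c hc
      have hc' : c ∈ s.toList := (List.dropWhile_sublist _).subset hc
      simp [h c hc']
    have : (PySem.Str.stripChars s "/").toList = [] := by
      rw [PySem.Str.toList_stripChars]; exact h'
    exact String.ext (by simpa [String.toList] using this)

-- every character of "/".join(l) is '/' iff that holds for every part of l
lemma join_slash_all_iff (l : List String) :
    (∀ c ∈ (PySem.Str.join "/" l).toList, c = '/') ↔ ∀ p ∈ l, ∀ c ∈ p.toList, c = '/' := by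
  rw [PySem.Str.toList_join]
  induction l with
  | nil => simp [PySem.Chars.join, List.intercalate]
  | cons p rest ih =>
    cases rest with
    | nil => simp [PySem.Chars.join, List.intercalate]
    | cons q rest' =>
      rw [List.map_cons, List.map_cons, PySem.Chars.join_cons_cons]
      constructor
      · intro h x hx c hc
        rcases List.mem_cons.mp hx with hx | hx
        · subst hx; exact h c (by simp [hc])
        · exact (ih.mp (fun c hc => h c (by simp; right; right; exact hc))) x hx c hc
      · intro h c hc
        simp only [List.mem_append] at hc
        rcases hc with (hc | hc) | hc
        · exact h p (by simp) c hc
        · simpa using hc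
        · exact (ih.mpr (fun x hx => h x (by simp [hx]))) c hc

-- candidate emptiness in terms of B's per-part test
lemma branchCand_empty_iff (l : List String) :
    (PySem.Str.stripChars (PySem.Str.join "/" l) "/" = "") ↔ ∀ p ∈ l, pvHasContent p = false := by
  rw [stripChars_slash_empty_iff, join_slash_all_iff]
  unfold pvHasContent
  constructor
  · intro h p hp
    simpa using (stripChars_slash_empty_iff p).mpr (h p hp)
  · intro h p hp
    have : PySem.Str.stripChars p "/" = "" := by
      have := h p hp; simpa using this
    exact (stripChars_slash_empty_iff p).mp this

-- the loop skips every index whose branch candidate is empty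
lemma pvALoop_skip (parts : List String) (idxs : List Nat) (best : String × String)
    (h : ∀ idx ∈ idxs, pvBranchCand parts idx = "") :
    pvALoop parts idxs best = best := by
  induction idxs with
  | nil => rfl
  | cons idx rest ih =>
    have h1 : pvBranchCand parts idx = "" := h idx (by simp)
    simp only [pvALoop, h1]
    exact ih (fun i hi => h i (by simp [hi]))

lemma pvALoop_skip_append (parts : List String) (idxs more : List Nat) (best : String × String)
    (h : ∀ idx ∈ idxs, pvBranchCand parts idx = "") :
    pvALoop parts (idxs ++ more) best = pvALoop parts more best := by
  induction idxs with
  | nil => rfl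
  | cons idx rest ih =>
    have h1 : pvBranchCand parts idx = "" := h idx (by simp)
    simp only [List.cons_append, pvALoop, h1]
    exact ih (fun i hi => h i (by simp [hi]))

-- once every remaining candidate has a nonempty branch and empty subdir, the loop keeps
-- overwriting best and returns the candidate at the LAST index
lemma pvALoop_tail (parts : List String) (idxs : List Nat) (best : String × String)
    (hne : idxs ≠ [])
    (hb : ∀ idx ∈ idxs, pvBranchCand parts idx ≠ "")
    (hs : ∀ idx ∈ idxs, pvSubdirCand parts idx = "") :
    pvALoop parts idxs best = (pvBranchCand parts (idxs.getLast hne), "") := by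
  induction idxs generalizing best with
  | nil => exact absurd rfl hne
  | cons idx rest ih =>
    have hb1 : pvBranchCand parts idx ≠ "" := hb idx (by simp)
    have hs1 : pvSubdirCand parts idx = "" := hs idx (by simp)
    cases rest with
    | nil => simp [pvALoop, hb1, hs1]
    | cons j rest' =>
      have hstep : pvALoop parts (idx :: j :: rest') best
          = pvALoop parts (j :: rest') (pvBranchCand parts idx, pvSubdirCand parts idx) := by
        simp [pvALoop, hb1, hs1]
      have hb' : ∀ i ∈ j :: rest', pvBranchCand parts i ≠ "" :=
        fun i hi => hb i (List.mem_cons_of_mem _ hi)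
      have hs' : ∀ i ∈ j :: rest', pvSubdirCand parts i = "" :=
        fun i hi => hs i (List.mem_cons_of_mem _ hi)
      have hne' : j :: rest' ≠ [] := List.cons_ne_nil j rest'
      rw [hstep]
      rw [List.getLast_cons hne']
      apply ih <;> (first | exact hne' | exact hb' | exact hs')

-- main equivalence for lists of length ≥ 2
lemma pvMain (parts : List String) (hlen : 2 ≤ parts.length) :
    pvALoop parts (List.range' 1 parts.length) ("", "") = split_tree_subpath_py_alt parts := by
  obtain ⟨a, b, rest, hparts⟩ : ∃ a b rest, parts = a :: b :: rest := by
    match parts, hlen with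
    | a :: b :: rest, _ => exact ⟨a, b, rest, rfl⟩
  have halt : split_tree_subpath_py_alt parts =
      match parts.findIdx? pvHasContent with
      | none => ("", "")
      | some i0 =>
        if (parts.drop (i0 + 1)).any pvHasContent then
          (PySem.Str.stripChars (PySem.Str.join "/" (parts.take (i0 + 1))) "/",
           PySem.Str.stripChars (PySem.Str.join "/" (parts.drop (i0 + 1))) "/")
        else
          (PySem.Str.stripChars (PySem.Str.join "/" parts) "/", "") := by
    rw [hparts]; rfl
  cases hfind : parts.findIdx? pvHasContent with
  | none =>
    -- no part has content: every branch candidate is empty, loop never updates best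
    have hall : ∀ p ∈ parts, pvHasContent p = false := List.findIdx?_eq_none_iff.mp hfind
    rw [halt, hfind]
    apply pvALoop_skip
    intro idx _
    exact (branchCand_empty_iff _).mpr (fun p hp => hall p (List.mem_of_mem_take hp))
  | some i0 =>
    obtain ⟨hi0lt, hi0, hbefore⟩ := List.findIdx?_eq_some_iff_getElem.mp hfind
    -- indices 1..i0 have empty branch candidates
    have hskip : ∀ idx ∈ List.range' 1 i0, pvBranchCand parts idx = "" := by
      intro idx hidx
      rw [List.mem_range'] at hidx
      obtain ⟨i, hi, rfl⟩ := hidx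
      apply (branchCand_empty_iff _).mpr
      intro p hp
      obtain ⟨j, hj, hpj⟩ := List.mem_iff_getElem.mp hp
      have hjlt : j < 1 + i * 1 := lt_of_lt_of_le hj (by simp [List.length_take])
      have hjlt' : j < parts.length := by
        have : (List.take (1 + i * 1) parts).length ≤ parts.length := by
          simp [List.length_take]
        omega
      have : p = parts[j] := by rw [← hpj]; exact List.getElem_take
      rw [this]
      by_contra hcontra
      have : pvHasContent parts[j] = true := by
        cases h : pvHasContent parts[j] with
        | true => rfl
        | false => exact absurd h hcontra
      exact hbefore j (by omega) this
    -- branch candidate at any idx ≥ i0+1 is nonempty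
    have hbranch_ne : ∀ idx, i0 + 1 ≤ idx → idx ≤ parts.length → pvBranchCand parts idx ≠ "" := by
      intro idx hge hle hempty
      have hmem : parts[i0] ∈ parts.take idx := by
        have hi0' : i0 < (parts.take idx).length := by simp [List.length_take]; omega
        have : (parts.take idx)[i0] = parts[i0] := List.getElem_take
        rw [← this]; exact List.getElem_mem hi0'
      have := (branchCand_empty_iff _).mp hempty parts[i0] hmem
      rw [hi0] at this; cases this
    -- split the index range at i0
    have hsplit : List.range' 1 parts.length
        = List.range' 1 i0 ++ List.range' (1 + i0) (parts.length - i0) := by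
      have := List.range'_append (s := 1) (m := i0) (n := parts.length - i0) (step := 1)
      rw [show 1 + 1 * i0 = 1 + i0 by ring] at this
      rw [this, Nat.add_sub_cancel' (le_of_lt hi0lt)]
    rw [halt, hfind, hsplit, pvALoop_skip_append parts _ _ _ hskip]
    have hlen_pos : 1 ≤ parts.length - i0 := by omega
    cases hsuf : (parts.drop (i0 + 1)).any pvHasContent with
    | true =>
      -- first index with nonempty branch also has nonempty subdir: break there
      obtain ⟨p, hp, hpc⟩ := List.any_eq_true.mp hsuf
      have hrange : List.range' (1 + i0) (parts.length - i0)
          = (i0 + 1) :: List.range' (i0 + 2) (parts.length - i0 - 1) := by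
        cases hn : parts.length - i0 with
        | zero => omega
        | succ m =>
          rw [List.range'_succ]
          congr 1
          · omega
          · congr 1
            omega
      rw [hrange]
      have hb1 : pvBranchCand parts (i0 + 1) ≠ "" := hbranch_ne (i0 + 1) le_rfl (by omega)
      have hs1 : pvSubdirCand parts (i0 + 1) ≠ "" := by
        intro hempty
        have := (branchCand_empty_iff _).mp hempty p hp
        rw [hpc] at this; cases this
      simp only [pvALoop, if_neg hb1, if_pos hs1, hsuf]
      simp [pvBranchCand, pvSubdirCand]
    | false =>
      -- nothing after i0 has content: loop runs to the end, best = whole path joined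
      have hnone : ∀ p ∈ parts.drop (i0 + 1), pvHasContent p = false := by
        intro p hp
        cases h : pvHasContent p with
        | false => rfl
        | true =>
          have : (parts.drop (i0 + 1)).any pvHasContent = true := List.any_eq_true.mpr ⟨p, hp, h⟩
          rw [hsuf] at this; cases this
      have hne : List.range' (1 + i0) (parts.length - i0) ≠ [] := by
        rw [ne_eq, List.range'_eq_nil_iff]
        omega
      rw [pvALoop_tail parts _ _ hne
        (by
          intro idx hidx
          rw [List.mem_range'] at hidx
          obtain ⟨i, hi, rfl⟩ := hidx
          exact hbranch_ne _ (by omega) (by omega))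
        (by
          intro idx hidx
          rw [List.mem_range'] at hidx
          obtain ⟨i, hi, rfl⟩ := hidx
          apply (branchCand_empty_iff _).mpr
          intro p hp
          apply hnone
          have hdd : parts.drop (1 + i0 + 1 * i) = List.drop ((1 + i0 + 1 * i) - (i0 + 1)) (parts.drop (i0 + 1)) := by
            rw [List.drop_drop]
            congr 1
            omega
          rw [hdd] at hp
          exact List.mem_of_mem_drop hp)]
      have hlast : (List.range' (1 + i0) (parts.length - i0)).getLast hne = parts.length := by
        rw [List.getLast_range']
        omega
      rw [hlast]
      unfold pvBranchCand
      rw [List.take_length]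
      simp [hsuf]
  
-- ===== VERDICT (by name: the statement is the Claim_ definition above) =====
theorem split_tree_subpath_py_spec : Claim_equal_split_tree_subpath_py := by
  intro parts _
  unfold Spec_split_tree_subpath_py
  rcases parts with _ | ⟨p, _ | ⟨q, rest⟩⟩
  · rfl
  · rfl
  · unfold split_tree_subpath_py
    rw [if_neg (by simp), if_neg (by simp)]
    exact pvMain (p :: q :: rest) (by simp)
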